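-- pv_equiv track=rewrite | github.com/jlosey/muller | GeneratorFunctions.py | findMValue
-- ===== SOURCE A (Python) =====
-- def findMValue(array): #step 3 of algorithm
--     n = len(array)-1 #last index
--     val=0
--     for i in range(1,n+1): #i loops from 1 to n
--         val = (n+1-i)*array[i+1]-array[0]
--         for j in range(n-i):#from 0 to n-1-i
--             val -= array[n-j]
--         if(val>=0): #truth condition of algorithm
--             return i
--
--     return -1 #otherwise return that row cannot be optimized.
-- ===== SOURCE B (Python) =====
-- def findMValue(array):  # single descending pass maintaining a running suffix sum
--     n = len(array) - 1
--     ans = -1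
--     s = 0
--     for i in range(n - 1, 0, -1):
--         s += array[i + 1]
--         if (n + 1 - i) * array[i + 1] - array[0] - s >= 0:
--             ans = i
--     return ans
-- ===== Notes on version B (the rewrite author's own statement) =====
-- stated objective: faster
-- what changed: Replaced the nested loop (recomputing the suffix sum from scratch for each i) by a single descending pass that maintains the suffix sum incrementally, keeping the smallest satisfying index.
-- crash fix: On every list of length >= 2 in which no index i in [1, n-1] satisfies the condition, A's loop reaches i = n and raises IndexError on array[n+1]; B returns -1 there. — e.g. on findMValue([0, 1]): A raises IndexError, B returns -1
import Mathlib
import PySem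

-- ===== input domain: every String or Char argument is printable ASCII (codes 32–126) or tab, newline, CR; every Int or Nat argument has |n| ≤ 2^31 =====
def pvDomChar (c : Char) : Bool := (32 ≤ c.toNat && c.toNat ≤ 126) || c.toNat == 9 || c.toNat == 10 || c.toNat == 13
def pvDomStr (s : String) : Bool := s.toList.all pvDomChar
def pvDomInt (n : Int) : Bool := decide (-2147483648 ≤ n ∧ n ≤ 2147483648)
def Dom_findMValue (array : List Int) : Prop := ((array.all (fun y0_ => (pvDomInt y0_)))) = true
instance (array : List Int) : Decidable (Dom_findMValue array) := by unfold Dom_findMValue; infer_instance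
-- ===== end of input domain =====

-- B replaces A's nested O(n^2) loops by one descending pass with a running suffix sum (objective: faster, asymptotic).

-- ===== PORT A =====
-- the for-i loop of A; inner for-j loop is the foldl over pyRange 0 (n-i)
def findMValueLoopA (array : List Int) (n : Int) : List Int → Int
  | [] => -1
  | i :: rest =>
    let val0 : Int := (n + 1 - i) * PySem.List.pyGetD array (i + 1) 0 - PySem.List.pyGetD array 0 0
    let val : Int := (PySem.List.pyRange 0 (n - i) 1).foldl
      (fun v j => v - PySem.List.pyGetD array (n - j) 0) val0
    if 0 ≤ val then i else findMValueLoopA array n rest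

def findMValue (array : List Int) : Int :=
  let n : Int := (array.length : Int) - 1
  findMValueLoopA array n (PySem.List.pyRange 1 (n + 1) 1)

-- ===== PORT B =====
def findMValue_alt (array : List Int) : Int :=
  let n : Int := (array.length : Int) - 1
  let st := (PySem.List.pyRange (n - 1) 0 (-1)).foldl
    (fun (st : Int × Int) i =>
      let s : Int := st.2 + PySem.List.pyGetD array (i + 1) 0
      let ans : Int :=
        if 0 ≤ (n + 1 - i) * PySem.List.pyGetD array (i + 1) 0 - PySem.List.pyGetD array 0 0 - s
        then i else st.1
      (ans, s)) ((-1 : Int), (0 : Int))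
  st.1

-- ===== PRECONDITION & SPEC =====
-- the value A tests at index i (declarative: suffix sum written with drop/sum)
def pvV (a : List Int) (i : Nat) : Int :=
  ((a.length : Int) - i) * a.getD (i + 1) 0 - a.getD 0 0 - (a.drop (i + 1)).sum

-- Pre_ excludes exactly the inputs on which A raises IndexError: lists of length ≥ 2 whose
-- loop finds no satisfying index i ≤ n-1 and therefore reaches i = n and reads array[n+1].
def Pre_findMValue (array : List Int) : Prop :=
  array.length ≤ 1 ∨ ∃ i < array.length, 1 ≤ i ∧ i + 1 < array.length ∧ 0 ≤ pvV array i
instance (array : List Int) : Decidable (Pre_findMValue array) := by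
  unfold Pre_findMValue; infer_instance

def pvWitness_findMValue : List Int := [0, 0, 0]

-- On every list of length ≥ 2 in which no index i in [1, n-1] satisfies the condition,
-- A raises IndexError on array[n+1]; B returns -1 there.
def Raises_findMValue (array : List Int) : Prop :=
  2 ≤ array.length ∧ ∀ i < array.length, ¬(1 ≤ i ∧ i + 1 < array.length ∧ 0 ≤ pvV array i)
instance (array : List Int) : Decidable (Raises_findMValue array) := by
  unfold Raises_findMValue; infer_instance
def pvRaiseWitness_findMValue : List Int := [0, 1]
def pvRaiseWitnessOut_findMValue : Int := -1

def Spec_findMValue (array : List Int) (out : Int) : Prop := out = findMValue_alt array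
instance (array : List Int) (out : Int) : Decidable (Spec_findMValue array out) := by
  unfold Spec_findMValue; infer_instance

-- ===== CLAIM (what is proved, stated in full; the proofs are below) =====
def Claim_equal_findMValue : Prop := ∀ (array : List Int), Dom_findMValue array → Pre_findMValue array → Spec_findMValue array (findMValue array)
def Claim_raises_findMValue : Prop := (∀ (array : List Int), Dom_findMValue array → Raises_findMValue array → ¬ Pre_findMValue array) ∧ (Dom_findMValue (pvRaiseWitness_findMValue) ∧ Raises_findMValue (pvRaiseWitness_findMValue) ∧ findMValue_alt (pvRaiseWitness_findMValue) = pvRaiseWitnessOut_findMValue)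

-- ===== LEMMAS AND PROOFS =====

-- reference: ascending scan, first i with 0 ≤ pvV a i among [1, len-2], else -1
def refAux (a : List Int) (i : Nat) : Int :=
  if i + 1 < a.length then
    if 0 ≤ pvV a i then (i : Int) else refAux a (i + 1)
  else -1
termination_by a.length - i

-- descending accumulator scan, as B performs it
def bfold (a : List Int) : Nat → Int → Int
  | 0, ans => ans
  | (m + 1), ans => bfold a m (if 0 ≤ pvV a (m + 1) then ((m + 1 : Nat) : Int) else ans)

-- (L1) the inner j-loop of A subtracts the sum of the last m elements
theorem pv_inner_fold (a : List Int) (m : Nat) (hm : m ≤ a.length) (v0 : Int) :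
    (PySem.List.pyRange 0 (m : Int) 1).foldl
      (fun v j => v - PySem.List.pyGetD a ((a.length : Int) - 1 - j) 0) v0
    = v0 - (a.drop (a.length - m)).sum := by
  induction m generalizing v0 with
  | zero => simp [PySem.List.pyRange_one_eq_nil]
  | succ m ih =>
    rw [show ((m + 1 : Nat) : Int) = (m : Int) + 1 by omega,
      PySem.List.pyRange_one_succ_right (by positivity), List.foldl_append,
      ih (by omega)]
    simp only [List.foldl_cons, List.foldl_nil]
    have hidx : (a.length : Int) - 1 - (m : Int) = ((a.length - 1 - m : Nat) : Int) := by
      omega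
    rw [hidx, PySem.List.pyGetD_natCast]
    have hlt : a.length - 1 - m < a.length := by omega
    have hdrop : a.drop (a.length - (m + 1)) = a[a.length - 1 - m] :: a.drop (a.length - m) := by
      have := List.drop_eq_getElem_cons hlt (l := a)
      rw [show a.length - 1 - m + 1 = a.length - m by omega] at this
      rw [show a.length - (m + 1) = a.length - 1 - m by omega, this]
    rw [hdrop, List.sum_cons, List.getD_eq_getElem _ _ hlt]
    ring

-- the value A computes at loop index i equals pvV a i
theorem pv_val_eq (a : List Int) (i : Nat) (h1 : 1 ≤ i) (h2 : i + 1 < a.length) :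
    (PySem.List.pyRange 0 (((a.length : Int) - 1) - (i : Int)) 1).foldl
      (fun v j => v - PySem.List.pyGetD a (((a.length : Int) - 1) - j) 0)
      (((a.length : Int) - 1 + 1 - (i : Int)) * PySem.List.pyGetD a ((i : Int) + 1) 0
        - PySem.List.pyGetD a 0 0)
    = pvV a i := by
  have hm : ((a.length : Int) - 1) - (i : Int) = ((a.length - 1 - i : Nat) : Int) := by
    omega
  rw [hm, pv_inner_fold a (a.length - 1 - i) (by omega)]
  have hi1 : ((i : Int) + 1) = ((i + 1 : Nat) : Int) := by omega
  rw [hi1, PySem.List.pyGetD_natCast, PySem.List.pyGetD_zero,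
    show a.length - (a.length - 1 - i) = i + 1 by omega]
  unfold pvV
  ring

-- (L2) A's loop from index i equals refAux, given a satisfying index ≥ i exists
theorem pv_loopA_eq (a : List Int) (i : Nat) (h1 : 1 ≤ i)
    (hex : ∃ k, i ≤ k ∧ k + 1 < a.length ∧ 0 ≤ pvV a k) :
    findMValueLoopA a ((a.length : Int) - 1)
      (PySem.List.pyRange (i : Int) ((a.length : Int) - 1 + 1) 1) = refAux a i := by
  obtain ⟨k, hik, hk, hVk⟩ := hex
  have hilt : i + 1 < a.length := by omega
  rw [PySem.List.pyRange_one_cons (by omega)]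
  unfold findMValueLoopA
  simp only []
  rw [pv_val_eq a i h1 hilt]
  conv_rhs => rw [refAux]
  rw [if_pos hilt]
  by_cases hV : 0 ≤ pvV a i
  · simp [hV]
  · rw [if_neg hV, if_neg hV]
    have hne : k ≠ i := fun h => hV (h ▸ hVk)
    rw [show (i : Int) + 1 = ((i + 1 : Nat) : Int) by omega]
    exact pv_loopA_eq a (i + 1) (by omega) ⟨k, by omega, hk, hVk⟩
termination_by a.length - i
decreasing_by omega

-- (L3a) B's fold computes bfold
theorem pv_foldB_eq (a : List Int) (m : Nat) (hm : m + 1 < a.length) (ans0 : Int) :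
    ((PySem.List.pyRange (m : Int) 0 (-1)).foldl
      (fun (st : Int × Int) i =>
        (if 0 ≤ ((a.length : Int) - 1 + 1 - i) * PySem.List.pyGetD a (i + 1) 0
              - PySem.List.pyGetD a 0 0 - (st.2 + PySem.List.pyGetD a (i + 1) 0)
          then i else st.1,
         st.2 + PySem.List.pyGetD a (i + 1) 0))
      (ans0, (a.drop (m + 2)).sum)).1 = bfold a m ans0 := by
  induction m generalizing ans0 with
  | zero => simp [PySem.List.pyRange_neg_one_eq_nil, bfold]
  | succ m ih =>
    rw [PySem.List.pyRange_neg_one_cons (by omega)]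
    simp only [List.foldl_cons]
    have hidx : ((m + 1 : Nat) : Int) + 1 = ((m + 2 : Nat) : Int) := by omega
    have hlt : m + 2 < a.length := by omega
    rw [hidx]
    have hs : (a.drop (m + 1 + 2)).sum + PySem.List.pyGetD a ((m + 2 : Nat) : Int) 0
        = (a.drop (m + 2)).sum := by
      rw [PySem.List.pyGetD_natCast, List.drop_eq_getElem_cons hlt (l := a), List.sum_cons,
        List.getD_eq_getElem _ _ hlt]
      ring
    rw [hs]
    have hcond : ((a.length : Int) - 1 + 1 - ((m + 1 : Nat) : Int))
          * PySem.List.pyGetD a ((m + 2 : Nat) : Int) 0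
        - PySem.List.pyGetD a 0 0 - (a.drop (m + 2)).sum = pvV a (m + 1) := by
      rw [PySem.List.pyGetD_natCast, PySem.List.pyGetD_zero]
      unfold pvV
      have h12 : m + 1 + 1 = m + 2 := by omega
      rw [h12]
      push_cast
      ring
    rw [hcond]
    rw [show ((m + 1 : Nat) : Int) - 1 = ((m : Nat) : Int) by omega]
    rw [ih (by omega)]
    rfl

-- (L3b) descending accumulator scan meets the ascending reference
theorem pv_bridge (a : List Int) (m : Nat) (hm : m ≤ a.length - 2) :
    bfold a m (refAux a (m + 1)) = refAux a 1 := by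
  induction m with
  | zero => rfl
  | succ m ih =>
    have hlen : m + 1 + 1 < a.length := by omega
    rw [bfold]
    have hstep : (if 0 ≤ pvV a (m + 1) then ((m + 1 : Nat) : Int) else refAux a (m + 1 + 1))
        = refAux a (m + 1) := by
      conv_rhs => rw [refAux]
      rw [if_pos hlen]
    rw [hstep, ih (by omega)]

-- (L4) B equals the reference everywhere
theorem pv_B_eq_ref (a : List Int) : findMValue_alt a = refAux a 1 := by
  simp only [findMValue_alt]
  by_cases hlen : a.length ≤ 2
  · rw [PySem.List.pyRange_neg_one_eq_nil (by omega)]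
    rw [refAux, if_neg (by omega)]
    rfl
  · have hcast : (a.length : Int) - 1 - 1 = ((a.length - 2 : Nat) : Int) := by omega
    simp only [hcast]
    have hfold := pv_foldB_eq a (a.length - 2) (by omega) (-1)
    rw [show a.length - 2 + 2 = a.length by omega, List.drop_length] at hfold
    simp only [List.sum_nil] at hfold
    rw [show ((a.length : Int) - 1 + 1) = (a.length : Int) by ring] at hfold ⊢
    rw [hfold]
    have href : refAux a (a.length - 2 + 1) = -1 := by
      rw [refAux, if_neg (by omega)]
    calc bfold a (a.length - 2) (-1)
        = bfold a (a.length - 2) (refAux a (a.length - 2 + 1)) := by rw [href]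
      _ = refAux a 1 := pv_bridge a (a.length - 2) (by omega)

-- ===== VERDICT (by name: the statement is the Claim_ definition above) =====
theorem findMValue_spec : Claim_equal_findMValue := by
  intro a _ hpre
  unfold Spec_findMValue
  rw [pv_B_eq_ref]
  simp only [findMValue]
  rcases hpre with hlen | ⟨i, hi, h1, h2, hV⟩
  · rw [PySem.List.pyRange_one_eq_nil (by omega)]
    rw [refAux, if_neg (by omega)]
    rfl
  · have := pv_loopA_eq a 1 le_rfl ⟨i, by omega, h2, hV⟩
    simpa using this

@[simp] theorem findMValue_raises : Claim_raises_findMValue := by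
  unfold Claim_raises_findMValue
  refine ⟨?_, by decide⟩
  intro a _ hr hpre
  obtain ⟨h2, hnone⟩ := hr
  rcases hpre with h | ⟨i, hi, hrest⟩
  · omega
  · exact hnone i hi hrest
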